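-- pv_equiv track=rewrite | github.com/nprapps/heat-income | download_data.py | full_colrows_check
-- ===== SOURCE A (Python) =====
-- def full_colrows_check(input_dict, full_threshold):
-- 	full_status = True
-- 	overfull_status = False
-- 	for key in input_dict:
-- 		if input_dict[key] > full_threshold + 1:
-- 			overfull_status = True
-- 		if input_dict[key] < full_threshold:
-- 			full_status = False
-- 	if overfull_status == True:
-- 		return True
-- 	return full_status
-- ===== SOURCE B (Python) =====
-- def full_colrows_check(input_dict, full_threshold):
--     vs = sorted(input_dict.values())
--     if not vs:
--         return True
--     return vs[-1] > full_threshold + 1 or vs[0] >= full_threshold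
-- ===== Notes on version B (the rewrite author's own statement) =====
-- stated objective: alternative
-- what changed: Replaced A's element-by-element loop maintaining two running boolean flags by sorting the values once and deciding from the two endpoints of the sorted list: True iff the list is empty, the largest value exceeds full_threshold + 1, or the smallest value is at least full_threshold.
import Mathlib
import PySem

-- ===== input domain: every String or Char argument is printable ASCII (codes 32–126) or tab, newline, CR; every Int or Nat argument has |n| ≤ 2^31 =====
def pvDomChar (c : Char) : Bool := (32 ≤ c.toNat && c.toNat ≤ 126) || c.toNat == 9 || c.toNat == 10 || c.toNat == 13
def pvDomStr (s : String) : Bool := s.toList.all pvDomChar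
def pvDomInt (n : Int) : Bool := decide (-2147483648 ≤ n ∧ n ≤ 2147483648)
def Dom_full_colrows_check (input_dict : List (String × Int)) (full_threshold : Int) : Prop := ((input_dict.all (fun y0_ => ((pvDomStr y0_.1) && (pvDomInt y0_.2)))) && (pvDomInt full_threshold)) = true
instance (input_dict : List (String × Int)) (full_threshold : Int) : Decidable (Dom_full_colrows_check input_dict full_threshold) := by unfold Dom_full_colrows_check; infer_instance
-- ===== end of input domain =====

-- B replaces A's flag-updating loop by sorting the values once and deciding from the two
-- endpoints of the sorted list (alternative sort-based algorithm, not claimed faster).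


-- ===== PORT A =====
-- iterating a Python dict visits each key once; `input_dict[key]` is that entry's value,
-- so the loop over keys with indexing is the fold over the (key,value) pairs.
def full_colrows_check (input_dict : List (String × Int)) (full_threshold : Int) : Bool :=
  let st := input_dict.foldl
    (fun (s : Bool × Bool) kv =>
      let s := if kv.2 > full_threshold + 1 then (s.1, true) else s
      if kv.2 < full_threshold then (false, s.2) else s)
    (true, false)
  if st.2 = true then true else st.1

-- ===== PORT B =====
-- vs = sorted(values); empty → True; else look only at vs[-1] (max) and vs[0] (min).
def full_colrows_check_alt (input_dict : List (String × Int)) (full_threshold : Int) : Bool :=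
  match PySem.List.sorted (input_dict.map Prod.snd) (fun x => x) false with
  | [] => true
  | v :: vs =>
      decide ((v :: vs).getLast (List.cons_ne_nil v vs) > full_threshold + 1)
        || decide (v ≥ full_threshold)

-- ===== PRECONDITION & SPEC =====
def Spec_full_colrows_check (input_dict : List (String × Int)) (full_threshold : Int) (out : Bool) : Prop := out = full_colrows_check_alt input_dict full_threshold
instance (input_dict : List (String × Int)) (full_threshold : Int) (out : Bool) : Decidable (Spec_full_colrows_check input_dict full_threshold out) := by unfold Spec_full_colrows_check; infer_instance

-- ===== CLAIM (what is proved, stated in full; the proofs are below) =====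
def Claim_equal_full_colrows_check : Prop := ∀ (input_dict : List (String × Int)) (full_threshold : Int), Dom_full_colrows_check input_dict full_threshold → Spec_full_colrows_check input_dict full_threshold (full_colrows_check input_dict full_threshold)

-- ===== LEMMAS AND PROOFS =====

-- A's fold computes (initial ∧ all values ≥ t, initial ∨ some value > t+1).
theorem foldA_char (t : Int) (l : List (String × Int)) (s : Bool × Bool) :
    l.foldl
      (fun (s : Bool × Bool) kv =>
        let s := if kv.2 > t + 1 then (s.1, true) else s
        if kv.2 < t then (false, s.2) else s) s
    = (s.1 && l.all (fun kv => decide (kv.2 ≥ t)),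
       s.2 || l.any (fun kv => decide (kv.2 > t + 1))) := by
  induction l generalizing s with
  | nil => simp
  | cons hd tl ih =>
      simp only [List.foldl_cons, List.all_cons, List.any_cons, ih]
      obtain ⟨a, b⟩ := s
      by_cases h2 : hd.2 < t
      · have h1 : ¬ hd.2 > t + 1 := by omega
        have e1 : decide (hd.2 ≥ t) = false := by simp; omega
        have e2 : decide (hd.2 > t + 1) = false := by simp; omega
        simp only [if_pos h2, if_neg h1, e1, e2]
        simp
      · by_cases h1 : hd.2 > t + 1
        · have e1 : decide (hd.2 ≥ t) = true := by simp; omega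
          have e2 : decide (hd.2 > t + 1) = true := by simp; omega
          simp only [if_pos h1, if_neg h2, e1, e2]
          simp
        · have e1 : decide (hd.2 ≥ t) = true := by simp; omega
          have e2 : decide (hd.2 > t + 1) = false := by simp; omega
          simp only [if_neg h1, if_neg h2, e1, e2]
          simp

theorem A_iff (l : List (String × Int)) (t : Int) :
    full_colrows_check l t = true ↔ ((∃ kv ∈ l, kv.2 > t + 1) ∨ (∀ kv ∈ l, kv.2 ≥ t)) := by
  unfold full_colrows_check
  rw [foldA_char]
  by_cases h : ∃ kv ∈ l, kv.2 > t + 1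
  · have : l.any (fun kv => decide (kv.2 > t + 1)) = true := by
      simpa using h
    simp [this, h]
  · have : l.any (fun kv => decide (kv.2 > t + 1)) = false := by
      simp only [List.any_eq_false]; intro kv hkv; simpa using fun hc => h ⟨kv, hkv, hc⟩
    simp [this, h, List.all_eq_true]

-- in a ≤-pairwise list every element is ≤ the last one
theorem le_getLast_of_pairwise : ∀ (s : List Int), s.Pairwise (· ≤ ·) →
    ∀ (hne : s ≠ []) (x : Int), x ∈ s → x ≤ s.getLast hne := by
  intro s
  induction s with
  | nil => intro _ hne; exact absurd rfl hne
  | cons hd tl ih =>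
      intro hp hne x hx
      cases tl with
      | nil => simp at hx; simp [hx, List.getLast]
      | cons b tb =>
          have hgl : (hd :: b :: tb).getLast hne = (b :: tb).getLast (by simp) := by
            rw [List.getLast_cons (by simp)]
          rcases List.mem_cons.mp hx with rfl | hx'
          · have hmem : (b :: tb).getLast (by simp) ∈ b :: tb := List.getLast_mem _
            have := (List.pairwise_cons.mp hp).1 _ hmem
            rw [hgl]; exact this
          · rw [hgl]
            exact ih (List.pairwise_cons.mp hp).2 (by simp) x hx'

theorem B_iff (l : List (String × Int)) (t : Int) :
    full_colrows_check_alt l t = true ↔ ((∃ kv ∈ l, kv.2 > t + 1) ∨ (∀ kv ∈ l, kv.2 ≥ t)) := by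
  unfold full_colrows_check_alt
  rcases hs : PySem.List.sorted (l.map Prod.snd) (fun x => x) false with _ | ⟨v, vs⟩
  · have hmapnil : l.map Prod.snd = [] := by
      have := PySem.List.sorted_eq_nil_iff (xs := l.map Prod.snd) (key := fun x => x) (rev := false)
      exact this.mp hs
    have hlnil : l = [] := by simpa using hmapnil
    subst hlnil; simp
  · have hpair : (v :: vs).Pairwise (fun a b : Int => a ≤ b) := by
      have := PySem.List.sorted_pairwise (xs := l.map Prod.snd) (key := fun x => x)
      rw [hs] at this; simpa using this
    have hmem : ∀ x : Int, x ∈ v :: vs ↔ x ∈ l.map Prod.snd := by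
      intro x
      have := PySem.List.mem_sorted (xs := l.map Prod.snd) (key := fun x => x) (rev := false) (x := x)
      rw [hs] at this; exact this
    have hne : (v :: vs) ≠ [] := List.cons_ne_nil v vs
    set M := (v :: vs).getLast hne with hM
    have hMmem : M ∈ l.map Prod.snd := (hmem M).mp (List.getLast_mem hne)
    have hvmem : v ∈ l.map Prod.snd := (hmem v).mp List.mem_cons_self
    have hMmax : ∀ kv ∈ l, kv.2 ≤ M := by
      intro kv hkv
      exact le_getLast_of_pairwise _ hpair hne kv.2
        ((hmem kv.2).mpr (List.mem_map_of_mem hkv))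
    have hvmin : ∀ kv ∈ l, v ≤ kv.2 := by
      intro kv hkv
      exact PySem.List.key_head_sorted_le _ _ hs kv.2 (List.mem_map_of_mem hkv)
    simp only [Bool.or_eq_true, decide_eq_true_iff]
    constructor
    · rintro (hM1 | hv1)
      · obtain ⟨kv, hkv, hkv2⟩ := List.mem_map.mp hMmem
        exact Or.inl ⟨kv, hkv, by rw [hkv2]; exact hM1⟩
      · exact Or.inr fun kv hkv => le_trans hv1 (hvmin kv hkv)
    · rintro (⟨kv, hkv, hgt⟩ | hall)
      · exact Or.inl (lt_of_lt_of_le hgt (hMmax kv hkv))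
      · obtain ⟨kv, hkv, hkv2⟩ := List.mem_map.mp hvmem
        exact Or.inr (by rw [← hkv2]; exact hall kv hkv)

-- ===== VERDICT (by name: the statement is the Claim_ definition above) =====
theorem full_colrows_check_spec : Claim_equal_full_colrows_check := by
  intro input_dict t _
  unfold Spec_full_colrows_check
  rw [Bool.eq_iff_iff, A_iff, B_iff]
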